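-- pv_equiv track=rewrite | github.com/makambajulius2020-stack/CEO-PORTAL | backend/services/excel_service.py | _get_intelligent_mapping
-- ===== SOURCE A (Python) =====
-- from typing import Dict, List, Optional
--
-- def _get_intelligent_mapping(columns: List[str], branch: str) -> Dict[str, str]:
--     """Maps Excel columns to standard schema using fuzzy logic (simulation)."""
--     std_schema = {
--         "item_name": ["Item Name", "SKU", "Product", "Description"],
--         "quantity": ["Quantity", "Units", "Qty", "Amount"],
--         "unit_cost": ["Unit Cost", "Cost/Unit", "Price", "Rate"],
--         "vendor": ["Supplier", "Vendor", "Source"],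
--         "category": ["Category", "Dept", "Group"]
--     }
--
--     mapping = {}
--     for key, aliases in std_schema.items():
--         for col in columns:
--             if col in aliases or col.lower() in [a.lower() for a in aliases]:
--                 mapping[key] = col
--                 break
--     return mapping
-- ===== SOURCE B (Python) =====
-- def _get_intelligent_mapping(columns, branch):
--     """Maps Excel columns to standard schema using fuzzy logic (simulation)."""
--     std_schema = {
--         "item_name": ["Item Name", "SKU", "Product", "Description"],
--         "quantity": ["Quantity", "Units", "Qty", "Amount"],
--         "unit_cost": ["Unit Cost", "Cost/Unit", "Price", "Rate"],
--         "vendor": ["Supplier", "Vendor", "Source"],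
--         "category": ["Category", "Dept", "Group"]
--     }
--     # reverse index: lowered alias -> schema key (aliases are disjoint across keys)
--     index = {a.lower(): k for k, aliases in std_schema.items() for a in aliases}
--     found = {}
--     for col in columns:
--         k = index.get(col.lower())
--         if k is not None and k not in found:
--             found[k] = col
--     return {k: found[k] for k in std_schema if k in found}
-- ===== Notes on version B (the rewrite author's own statement) =====
-- stated objective: faster
-- what changed: Replaces the nested key x column scan (rebuilding lowered alias lists per column) with a reverse index alias.lower()->key built once, one pass over columns, and a final readout in schema order.
import Mathlib
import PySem

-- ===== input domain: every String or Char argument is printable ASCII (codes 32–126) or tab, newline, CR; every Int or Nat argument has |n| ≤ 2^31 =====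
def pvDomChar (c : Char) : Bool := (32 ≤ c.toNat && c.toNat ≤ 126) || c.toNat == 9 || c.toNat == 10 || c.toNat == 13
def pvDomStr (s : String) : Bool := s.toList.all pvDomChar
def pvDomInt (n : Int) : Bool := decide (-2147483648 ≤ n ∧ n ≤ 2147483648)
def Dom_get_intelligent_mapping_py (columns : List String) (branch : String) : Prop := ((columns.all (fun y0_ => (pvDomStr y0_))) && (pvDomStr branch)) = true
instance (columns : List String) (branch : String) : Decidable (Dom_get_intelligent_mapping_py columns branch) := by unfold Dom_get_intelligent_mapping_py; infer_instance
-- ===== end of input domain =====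

-- B replaces A's nested key×column scan by a reverse index alias.lower()→key built once, a single
-- pass over the columns, and a readout in schema order (objective: faster by a constant factor).

-- ===== PORT A =====
-- the std_schema dict literal, shared by both ports (it is a constant of the module)
def pvStdSchema : List (String × List String) :=
  [("item_name", ["Item Name", "SKU", "Product", "Description"]),
   ("quantity", ["Quantity", "Units", "Qty", "Amount"]),
   ("unit_cost", ["Unit Cost", "Cost/Unit", "Price", "Rate"]),
   ("vendor", ["Supplier", "Vendor", "Source"]),
   ("category", ["Category", "Dept", "Group"])]

-- 'col in aliases or col.lower() in [a.lower() for a in aliases]'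
def pvAMatch (col : String) (aliases : List String) : Bool :=
  aliases.contains col || (aliases.map PySem.Str.lower).contains (PySem.Str.lower col)

-- 'for col in columns: if <match>: mapping[key] = col; break'
def pvAInner (m : PySem.Dict String String) (key : String) (aliases : List String) :
    List String → PySem.Dict String String
  | [] => m
  | c :: rest => if pvAMatch c aliases then m.insert key c else pvAInner m key aliases rest

def get_intelligent_mapping_py (columns : List String) (branch : String) : List (String × String) :=
  (pvStdSchema.foldl (fun m kv => pvAInner m kv.1 kv.2 columns) PySem.Dict.empty).items

-- ===== PORT B =====
-- 'index = {a.lower(): k for k, aliases in std_schema.items() for a in aliases}'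
def pvIndex : PySem.Dict String String :=
  pvStdSchema.foldl (fun d kv => kv.2.foldl (fun d a => d.insert (PySem.Str.lower a) kv.1) d)
    PySem.Dict.empty

-- loop body: 'k = index.get(col.lower());  if k is not None and k not in found: found[k] = col'
def pvBStep (f : PySem.Dict String String) (c : String) : PySem.Dict String String :=
  match pvIndex.get? (PySem.Str.lower c) with
  | some k => if f.contains k then f else f.insert k c
  | none => f

def get_intelligent_mapping_py_alt (columns : List String) (branch : String) :
    List (String × String) :=
  let found := columns.foldl pvBStep PySem.Dict.empty
  -- '{k: found[k] for k in std_schema if k in found}'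
  pvStdSchema.filterMap (fun kv => (found.get? kv.1).map (fun v => (kv.1, v)))

-- ===== PRECONDITION & SPEC =====
def Spec_get_intelligent_mapping_py (columns : List String) (branch : String) (out : List (String × String)) : Prop := out = get_intelligent_mapping_py_alt columns branch
instance (columns : List String) (branch : String) (out : List (String × String)) : Decidable (Spec_get_intelligent_mapping_py columns branch out) := by unfold Spec_get_intelligent_mapping_py; infer_instance

-- ===== CLAIM (what is proved, stated in full; the proofs are below) =====
def Claim_equal_get_intelligent_mapping_py : Prop := ∀ (columns : List String) (branch : String), Dom_get_intelligent_mapping_py columns branch → Spec_get_intelligent_mapping_py columns branch (get_intelligent_mapping_py columns branch)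

-- ===== LEMMAS AND PROOFS =====

-- first column (in order) satisfying p — the value both inner scans are after
def pvFirstHit (p : String → Bool) : List String → Option String
  | [] => none
  | c :: rest => if p c then some c else pvFirstHit p rest

theorem pvFirstHit_congr (p q : String → Bool) (h : ∀ c, p c = q c) :
    ∀ xs, pvFirstHit p xs = pvFirstHit q xs := by
  intro xs
  induction xs with
  | nil => rfl
  | cons c rest ih => simp only [pvFirstHit, h c, ih]

-- A's inner loop computes the first hit
theorem pvAInner_eq (m : PySem.Dict String String) (key : String) (aliases : List String)
    (cols : List String) :
    pvAInner m key aliases cols =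
      match pvFirstHit (fun c => pvAMatch c aliases) cols with
      | some c => m.insert key c
      | none => m := by
  induction cols with
  | nil => rfl
  | cons c rest ih =>
    simp only [pvAInner, pvFirstHit]
    by_cases h : pvAMatch c aliases = true
    · simp [h]
    · simp only [Bool.not_eq_true] at h
      simp [h, ih]

-- the concrete reverse index
theorem pvIndex_eq : pvIndex = PySem.Dict.mk
    [("item name", "item_name"), ("sku", "item_name"), ("product", "item_name"), ("description", "item_name"), ("quantity", "quantity"), ("units", "quantity"), ("qty", "quantity"), ("amount", "quantity"), ("unit cost", "unit_cost"), ("cost/unit", "unit_cost"), ("price", "unit_cost"), ("rate", "unit_cost"), ("supplier", "vendor"), ("vendor", "vendor"), ("source", "vendor"), ("category", "category"), ("dept", "category"), ("group", "category")] := by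
  decide

theorem pvIdx_item_name (s : String) :
    (pvIndex.get? s == some "item_name") = (["item name", "sku", "product", "description"] : List String).contains s := by
  by_cases h0 : s = "item name"
  · subst h0; decide
  by_cases h1 : s = "sku"
  · subst h1; decide
  by_cases h2 : s = "product"
  · subst h2; decide
  by_cases h3 : s = "description"
  · subst h3; decide
  by_cases h4 : s = "quantity"
  · subst h4; decide
  by_cases h5 : s = "units"
  · subst h5; decide
  by_cases h6 : s = "qty"
  · subst h6; decide
  by_cases h7 : s = "amount"
  · subst h7; decide
  by_cases h8 : s = "unit cost"
  · subst h8; decide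
  by_cases h9 : s = "cost/unit"
  · subst h9; decide
  by_cases h10 : s = "price"
  · subst h10; decide
  by_cases h11 : s = "rate"
  · subst h11; decide
  by_cases h12 : s = "supplier"
  · subst h12; decide
  by_cases h13 : s = "vendor"
  · subst h13; decide
  by_cases h14 : s = "source"
  · subst h14; decide
  by_cases h15 : s = "category"
  · subst h15; decide
  by_cases h16 : s = "dept"
  · subst h16; decide
  by_cases h17 : s = "group"
  · subst h17; decide
  simp [pvIndex_eq, PySem.Dict.get?_mk_cons, PySem.Dict.get?, h0, h1, h2, h3, h4, h5, h6, h7, h8, h9, h10, h11, h12, h13, h14, h15, h16, h17, Ne.symm h0, Ne.symm h1, Ne.symm h2, Ne.symm h3, Ne.symm h4, Ne.symm h5, Ne.symm h6, Ne.symm h7, Ne.symm h8, Ne.symm h9, Ne.symm h10, Ne.symm h11, Ne.symm h12, Ne.symm h13, Ne.symm h14, Ne.symm h15, Ne.symm h16, Ne.symm h17]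

theorem pvIdx_quantity (s : String) :
    (pvIndex.get? s == some "quantity") = (["quantity", "units", "qty", "amount"] : List String).contains s := by
  by_cases h0 : s = "item name"
  · subst h0; decide
  by_cases h1 : s = "sku"
  · subst h1; decide
  by_cases h2 : s = "product"
  · subst h2; decide
  by_cases h3 : s = "description"
  · subst h3; decide
  by_cases h4 : s = "quantity"
  · subst h4; decide
  by_cases h5 : s = "units"
  · subst h5; decide
  by_cases h6 : s = "qty"
  · subst h6; decide
  by_cases h7 : s = "amount"
  · subst h7; decide
  by_cases h8 : s = "unit cost"
  · subst h8; decide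
  by_cases h9 : s = "cost/unit"
  · subst h9; decide
  by_cases h10 : s = "price"
  · subst h10; decide
  by_cases h11 : s = "rate"
  · subst h11; decide
  by_cases h12 : s = "supplier"
  · subst h12; decide
  by_cases h13 : s = "vendor"
  · subst h13; decide
  by_cases h14 : s = "source"
  · subst h14; decide
  by_cases h15 : s = "category"
  · subst h15; decide
  by_cases h16 : s = "dept"
  · subst h16; decide
  by_cases h17 : s = "group"
  · subst h17; decide
  simp [pvIndex_eq, PySem.Dict.get?_mk_cons, PySem.Dict.get?, h0, h1, h2, h3, h4, h5, h6, h7, h8, h9, h10, h11, h12, h13, h14, h15, h16, h17, Ne.symm h0, Ne.symm h1, Ne.symm h2, Ne.symm h3, Ne.symm h4, Ne.symm h5, Ne.symm h6, Ne.symm h7, Ne.symm h8, Ne.symm h9, Ne.symm h10, Ne.symm h11, Ne.symm h12, Ne.symm h13, Ne.symm h14, Ne.symm h15, Ne.symm h16, Ne.symm h17]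

theorem pvIdx_unit_cost (s : String) :
    (pvIndex.get? s == some "unit_cost") = (["unit cost", "cost/unit", "price", "rate"] : List String).contains s := by
  by_cases h0 : s = "item name"
  · subst h0; decide
  by_cases h1 : s = "sku"
  · subst h1; decide
  by_cases h2 : s = "product"
  · subst h2; decide
  by_cases h3 : s = "description"
  · subst h3; decide
  by_cases h4 : s = "quantity"
  · subst h4; decide
  by_cases h5 : s = "units"
  · subst h5; decide
  by_cases h6 : s = "qty"
  · subst h6; decide
  by_cases h7 : s = "amount"
  · subst h7; decide
  by_cases h8 : s = "unit cost"
  · subst h8; decide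
  by_cases h9 : s = "cost/unit"
  · subst h9; decide
  by_cases h10 : s = "price"
  · subst h10; decide
  by_cases h11 : s = "rate"
  · subst h11; decide
  by_cases h12 : s = "supplier"
  · subst h12; decide
  by_cases h13 : s = "vendor"
  · subst h13; decide
  by_cases h14 : s = "source"
  · subst h14; decide
  by_cases h15 : s = "category"
  · subst h15; decide
  by_cases h16 : s = "dept"
  · subst h16; decide
  by_cases h17 : s = "group"
  · subst h17; decide
  simp [pvIndex_eq, PySem.Dict.get?_mk_cons, PySem.Dict.get?, h0, h1, h2, h3, h4, h5, h6, h7, h8, h9, h10, h11, h12, h13, h14, h15, h16, h17, Ne.symm h0, Ne.symm h1, Ne.symm h2, Ne.symm h3, Ne.symm h4, Ne.symm h5, Ne.symm h6, Ne.symm h7, Ne.symm h8, Ne.symm h9, Ne.symm h10, Ne.symm h11, Ne.symm h12, Ne.symm h13, Ne.symm h14, Ne.symm h15, Ne.symm h16, Ne.symm h17]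

theorem pvIdx_vendor (s : String) :
    (pvIndex.get? s == some "vendor") = (["supplier", "vendor", "source"] : List String).contains s := by
  by_cases h0 : s = "item name"
  · subst h0; decide
  by_cases h1 : s = "sku"
  · subst h1; decide
  by_cases h2 : s = "product"
  · subst h2; decide
  by_cases h3 : s = "description"
  · subst h3; decide
  by_cases h4 : s = "quantity"
  · subst h4; decide
  by_cases h5 : s = "units"
  · subst h5; decide
  by_cases h6 : s = "qty"
  · subst h6; decide
  by_cases h7 : s = "amount"
  · subst h7; decide
  by_cases h8 : s = "unit cost"
  · subst h8; decide
  by_cases h9 : s = "cost/unit"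
  · subst h9; decide
  by_cases h10 : s = "price"
  · subst h10; decide
  by_cases h11 : s = "rate"
  · subst h11; decide
  by_cases h12 : s = "supplier"
  · subst h12; decide
  by_cases h13 : s = "vendor"
  · subst h13; decide
  by_cases h14 : s = "source"
  · subst h14; decide
  by_cases h15 : s = "category"
  · subst h15; decide
  by_cases h16 : s = "dept"
  · subst h16; decide
  by_cases h17 : s = "group"
  · subst h17; decide
  simp [pvIndex_eq, PySem.Dict.get?_mk_cons, PySem.Dict.get?, h0, h1, h2, h3, h4, h5, h6, h7, h8, h9, h10, h11, h12, h13, h14, h15, h16, h17, Ne.symm h0, Ne.symm h1, Ne.symm h2, Ne.symm h3, Ne.symm h4, Ne.symm h5, Ne.symm h6, Ne.symm h7, Ne.symm h8, Ne.symm h9, Ne.symm h10, Ne.symm h11, Ne.symm h12, Ne.symm h13, Ne.symm h14, Ne.symm h15, Ne.symm h16, Ne.symm h17]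

theorem pvIdx_category (s : String) :
    (pvIndex.get? s == some "category") = (["category", "dept", "group"] : List String).contains s := by
  by_cases h0 : s = "item name"
  · subst h0; decide
  by_cases h1 : s = "sku"
  · subst h1; decide
  by_cases h2 : s = "product"
  · subst h2; decide
  by_cases h3 : s = "description"
  · subst h3; decide
  by_cases h4 : s = "quantity"
  · subst h4; decide
  by_cases h5 : s = "units"
  · subst h5; decide
  by_cases h6 : s = "qty"
  · subst h6; decide
  by_cases h7 : s = "amount"
  · subst h7; decide
  by_cases h8 : s = "unit cost"
  · subst h8; decide
  by_cases h9 : s = "cost/unit"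
  · subst h9; decide
  by_cases h10 : s = "price"
  · subst h10; decide
  by_cases h11 : s = "rate"
  · subst h11; decide
  by_cases h12 : s = "supplier"
  · subst h12; decide
  by_cases h13 : s = "vendor"
  · subst h13; decide
  by_cases h14 : s = "source"
  · subst h14; decide
  by_cases h15 : s = "category"
  · subst h15; decide
  by_cases h16 : s = "dept"
  · subst h16; decide
  by_cases h17 : s = "group"
  · subst h17; decide
  simp [pvIndex_eq, PySem.Dict.get?_mk_cons, PySem.Dict.get?, h0, h1, h2, h3, h4, h5, h6, h7, h8, h9, h10, h11, h12, h13, h14, h15, h16, h17, Ne.symm h0, Ne.symm h1, Ne.symm h2, Ne.symm h3, Ne.symm h4, Ne.symm h5, Ne.symm h6, Ne.symm h7, Ne.symm h8, Ne.symm h9, Ne.symm h10, Ne.symm h11, Ne.symm h12, Ne.symm h13, Ne.symm h14, Ne.symm h15, Ne.symm h16, Ne.symm h17]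

theorem pvMatch_item_name (c : String) :
    pvAMatch c ["Item Name", "SKU", "Product", "Description"] = (["item name", "sku", "product", "description"] : List String).contains (PySem.Str.lower c) := by
  have hmap : (["Item Name", "SKU", "Product", "Description"].map PySem.Str.lower : List String) = ["item name", "sku", "product", "description"] := by decide
  unfold pvAMatch
  rw [hmap]
  cases hc : (["Item Name", "SKU", "Product", "Description"] : List String).contains c with
  | false => simp
  | true =>
    simp only [List.contains_eq_mem, decide_eq_true_eq, List.mem_cons, List.not_mem_nil, or_false] at hc
    rcases hc with rfl | rfl | rfl | rfl
    all_goals decide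

theorem pvMatch_quantity (c : String) :
    pvAMatch c ["Quantity", "Units", "Qty", "Amount"] = (["quantity", "units", "qty", "amount"] : List String).contains (PySem.Str.lower c) := by
  have hmap : (["Quantity", "Units", "Qty", "Amount"].map PySem.Str.lower : List String) = ["quantity", "units", "qty", "amount"] := by decide
  unfold pvAMatch
  rw [hmap]
  cases hc : (["Quantity", "Units", "Qty", "Amount"] : List String).contains c with
  | false => simp
  | true =>
    simp only [List.contains_eq_mem, decide_eq_true_eq, List.mem_cons, List.not_mem_nil, or_false] at hc
    rcases hc with rfl | rfl | rfl | rfl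
    all_goals decide

theorem pvMatch_unit_cost (c : String) :
    pvAMatch c ["Unit Cost", "Cost/Unit", "Price", "Rate"] = (["unit cost", "cost/unit", "price", "rate"] : List String).contains (PySem.Str.lower c) := by
  have hmap : (["Unit Cost", "Cost/Unit", "Price", "Rate"].map PySem.Str.lower : List String) = ["unit cost", "cost/unit", "price", "rate"] := by decide
  unfold pvAMatch
  rw [hmap]
  cases hc : (["Unit Cost", "Cost/Unit", "Price", "Rate"] : List String).contains c with
  | false => simp
  | true =>
    simp only [List.contains_eq_mem, decide_eq_true_eq, List.mem_cons, List.not_mem_nil, or_false] at hc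
    rcases hc with rfl | rfl | rfl | rfl
    all_goals decide

theorem pvMatch_vendor (c : String) :
    pvAMatch c ["Supplier", "Vendor", "Source"] = (["supplier", "vendor", "source"] : List String).contains (PySem.Str.lower c) := by
  have hmap : (["Supplier", "Vendor", "Source"].map PySem.Str.lower : List String) = ["supplier", "vendor", "source"] := by decide
  unfold pvAMatch
  rw [hmap]
  cases hc : (["Supplier", "Vendor", "Source"] : List String).contains c with
  | false => simp
  | true =>
    simp only [List.contains_eq_mem, decide_eq_true_eq, List.mem_cons, List.not_mem_nil, or_false] at hc
    rcases hc with rfl | rfl | rfl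
    all_goals decide

theorem pvMatch_category (c : String) :
    pvAMatch c ["Category", "Dept", "Group"] = (["category", "dept", "group"] : List String).contains (PySem.Str.lower c) := by
  have hmap : (["Category", "Dept", "Group"].map PySem.Str.lower : List String) = ["category", "dept", "group"] := by decide
  unfold pvAMatch
  rw [hmap]
  cases hc : (["Category", "Dept", "Group"] : List String).contains c with
  | false => simp
  | true =>
    simp only [List.contains_eq_mem, decide_eq_true_eq, List.mem_cons, List.not_mem_nil, or_false] at hc
    rcases hc with rfl | rfl | rfl
    all_goals decide

theorem pvKey_item_name (c : String) :
    (pvIndex.get? (PySem.Str.lower c) == some "item_name") = pvAMatch c ["Item Name", "SKU", "Product", "Description"] := by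
  rw [pvMatch_item_name, pvIdx_item_name]

theorem pvKey_quantity (c : String) :
    (pvIndex.get? (PySem.Str.lower c) == some "quantity") = pvAMatch c ["Quantity", "Units", "Qty", "Amount"] := by
  rw [pvMatch_quantity, pvIdx_quantity]

theorem pvKey_unit_cost (c : String) :
    (pvIndex.get? (PySem.Str.lower c) == some "unit_cost") = pvAMatch c ["Unit Cost", "Cost/Unit", "Price", "Rate"] := by
  rw [pvMatch_unit_cost, pvIdx_unit_cost]

theorem pvKey_vendor (c : String) :
    (pvIndex.get? (PySem.Str.lower c) == some "vendor") = pvAMatch c ["Supplier", "Vendor", "Source"] := by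
  rw [pvMatch_vendor, pvIdx_vendor]

theorem pvKey_category (c : String) :
    (pvIndex.get? (PySem.Str.lower c) == some "category") = pvAMatch c ["Category", "Dept", "Group"] := by
  rw [pvMatch_category, pvIdx_category]

-- B's loop body, observed through get?
theorem pvBStep_get? (f : PySem.Dict String String) (c k : String) :
    (pvBStep f c).get? k =
      if (pvIndex.get? (PySem.Str.lower c) == some k) && !(f.contains k) then some c
      else f.get? k := by
  unfold pvBStep
  rcases hidx : pvIndex.get? (PySem.Str.lower c) with _ | k'
  · simp
  · show (if f.contains k' = true then f else f.insert k' c).get? k =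
        if (some k' == some k && !f.contains k) = true then some c else f.get? k
    by_cases hkk : k' = k
    · subst hkk
      by_cases hc : f.contains k' = true
      · rw [if_pos hc]; simp [hc]
      · rw [if_neg hc]
        rw [PySem.Dict.get?_insert_self]
        have hc' : f.contains k' = false := by simpa using hc
        simp [hc']
    · by_cases hc : f.contains k' = true
      · rw [if_pos hc]; simp [hkk]
      · rw [if_neg hc]
        rw [PySem.Dict.get?_insert_of_ne _ _ (fun h => hkk h.symm)]
        simp [hkk]

-- B's single pass: the entry recorded for k is the first column the index sends to k
theorem pvBFold_get (cols : List String) :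
    ∀ (f : PySem.Dict String String) (k : String),
      (cols.foldl pvBStep f).get? k =
        (f.get? k).or (pvFirstHit (fun c => pvIndex.get? (PySem.Str.lower c) == some k) cols) := by
  induction cols with
  | nil => intro f k; simp [pvFirstHit]
  | cons c rest ih =>
    intro f k
    simp only [List.foldl_cons, pvFirstHit]
    rw [ih, pvBStep_get?]
    by_cases hk : (pvIndex.get? (PySem.Str.lower c) == some k) = true
    · by_cases hc : f.contains k = true
      · rcases hg : f.get? k with _ | v
        · exact absurd ((PySem.Dict.get?_eq_none_iff_contains f k).mp hg) (by simp [hc])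
        · simp [hk, hc, hg]
      · have hg : f.get? k = none :=
          (PySem.Dict.get?_eq_none_iff_contains f k).mpr (by simpa using hc)
        simp [hk, hc, hg]
    · simp [hk]

-- ===== VERDICT (by name: the statement is the Claim_ definition above) =====
theorem get_intelligent_mapping_py_spec : Claim_equal_get_intelligent_mapping_py := by
  intro columns branch _
  unfold Spec_get_intelligent_mapping_py get_intelligent_mapping_py get_intelligent_mapping_py_alt
  simp only [pvStdSchema, List.foldl_cons, List.foldl_nil, List.filterMap_cons, List.filterMap_nil]
  rw [pvAInner_eq, pvAInner_eq, pvAInner_eq, pvAInner_eq, pvAInner_eq]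

  rw [pvBFold_get columns PySem.Dict.empty "item_name", PySem.Dict.get?_empty, Option.none_or,
    pvFirstHit_congr _ _ (pvKey_item_name) columns]

  rw [pvBFold_get columns PySem.Dict.empty "quantity", PySem.Dict.get?_empty, Option.none_or,
    pvFirstHit_congr _ _ (pvKey_quantity) columns]

  rw [pvBFold_get columns PySem.Dict.empty "unit_cost", PySem.Dict.get?_empty, Option.none_or,
    pvFirstHit_congr _ _ (pvKey_unit_cost) columns]

  rw [pvBFold_get columns PySem.Dict.empty "vendor", PySem.Dict.get?_empty, Option.none_or,
    pvFirstHit_congr _ _ (pvKey_vendor) columns]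

  rw [pvBFold_get columns PySem.Dict.empty "category", PySem.Dict.get?_empty, Option.none_or,
    pvFirstHit_congr _ _ (pvKey_category) columns]

  rcases pvFirstHit (fun c => pvAMatch c ["Item Name", "SKU", "Product", "Description"]) columns with _ | c1 <;>
  rcases pvFirstHit (fun c => pvAMatch c ["Quantity", "Units", "Qty", "Amount"]) columns with _ | c2 <;>
  rcases pvFirstHit (fun c => pvAMatch c ["Unit Cost", "Cost/Unit", "Price", "Rate"]) columns with _ | c3 <;>
  rcases pvFirstHit (fun c => pvAMatch c ["Supplier", "Vendor", "Source"]) columns with _ | c4 <;>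
  rcases pvFirstHit (fun c => pvAMatch c ["Category", "Dept", "Group"]) columns with _ | c5 <;>
  simp [PySem.Dict.insert, PySem.Dict.empty]
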